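-- pv_equiv track=rewrite | github.com/irongiant33/AdventOfCode | 2020/Day17/solution.py | add_border
-- ===== SOURCE A (Python) =====
-- def add_border(state):
-- 	num_hyper = len(state)
-- 	num_dimensions = len(state[0])
-- 	num_row = len(state[0][0])
-- 	period_row = list('.'*(num_row + 2))
-- 	period_hyper = []
-- 	for j in range(0,num_dimensions+2):
-- 		period_dimension = []
-- 		for i in range(0,num_row + 2):
-- 			period_dimension.append(period_row)
-- 		period_hyper.append(period_dimension)
--
-- 	new_state = [period_hyper]
-- 	for h in range(0,num_hyper):
-- 		hyper = [period_dimension]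
-- 		for i in range(0,num_dimensions):
-- 			dimension = [period_row]
-- 			for j in range(0,num_row):
-- 				row = ['.']
-- 				for k in range(0,num_row):
-- 					row.append(state[h][i][j][k])
-- 				row.append('.')
-- 				dimension.append(row)
-- 			dimension.append(period_row)
-- 			hyper.append(dimension)
-- 		hyper.append(period_dimension)
-- 		new_state.append(hyper)
-- 	new_state.append(period_hyper)
-- 	return new_state
-- ===== SOURCE B (Python) =====
-- def add_border(state):
-- 	num_hyper = len(state)
-- 	num_dimensions = len(state[0])
-- 	num_row = len(state[0][0])
-- 	return [[[[state[h-1][i-1][j-1][k-1]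
-- 	           if 1 <= h <= num_hyper and 1 <= i <= num_dimensions
-- 	              and 1 <= j <= num_row and 1 <= k <= num_row
-- 	           else '.'
-- 	           for k in range(num_row + 2)]
-- 	          for j in range(num_row + 2)]
-- 	         for i in range(num_dimensions + 2)]
-- 	        for h in range(num_hyper + 2)]
-- ===== Notes on version B (the rewrite author's own statement) =====
-- stated objective: simpler
-- what changed: Replaces A's incremental append loops with shared pre-built border rows/slices by a single closed-form nested comprehension over the padded index space that selects state[h-1][i-1][j-1][k-1] inside the interior and '.' on the border.
import Mathlib
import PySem

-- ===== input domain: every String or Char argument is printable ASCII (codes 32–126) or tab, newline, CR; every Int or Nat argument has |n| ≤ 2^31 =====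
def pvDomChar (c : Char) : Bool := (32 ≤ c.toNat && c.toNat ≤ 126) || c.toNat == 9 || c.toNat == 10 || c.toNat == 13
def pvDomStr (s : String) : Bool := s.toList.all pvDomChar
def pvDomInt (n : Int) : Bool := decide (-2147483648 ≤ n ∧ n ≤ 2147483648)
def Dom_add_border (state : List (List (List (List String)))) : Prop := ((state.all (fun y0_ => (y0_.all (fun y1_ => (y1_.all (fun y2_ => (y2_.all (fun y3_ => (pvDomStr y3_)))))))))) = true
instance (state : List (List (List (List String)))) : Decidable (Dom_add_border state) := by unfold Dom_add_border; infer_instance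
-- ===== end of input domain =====

-- B replaces A's border-append loop construction by one closed-form nested
-- comprehension over the padded index space (objective: simpler, same cost).

-- ===== PORT A =====
-- literal transliteration of A: border rows/slices built by append loops, then
-- the interior appended between border copies, loop by loop (foldl = the loop).
def add_border (state : List (List (List (List String)))) : List (List (List (List String))) :=
  let num_hyper := state.length
  let num_dimensions := (state.headD []).length
  let num_row := ((state.headD []).headD []).length
  let period_row : List String := List.replicate (num_row + 2) "."
  -- the inner loop body builds the same period_dimension on every iteration
  let period_dimension : List (List String) :=
    (List.range (num_row + 2)).foldl (fun acc _ => acc ++ [period_row]) []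
  let period_hyper : List (List (List String)) :=
    (List.range (num_dimensions + 2)).foldl (fun acc _ => acc ++ [period_dimension]) []
  let new_state :=
    (List.range num_hyper).foldl (fun acc h =>
      let hyper :=
        (List.range num_dimensions).foldl (fun hacc i =>
          let dimension :=
            (List.range num_row).foldl (fun dacc j =>
              let row :=
                (List.range num_row).foldl (fun racc k =>
                  racc ++ [((((state.getD h []).getD i []).getD j []).getD k ".")]) ["."]
              dacc ++ [row ++ ["."]]) [period_row]
          hacc ++ [dimension ++ [period_row]]) [period_dimension]
      acc ++ [hyper ++ [period_dimension]]) [period_hyper]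
  new_state ++ [period_hyper]

-- ===== PORT B =====
-- literal transliteration of B: one nested comprehension over padded indices
def add_border_alt (state : List (List (List (List String)))) : List (List (List (List String))) :=
  let num_hyper := state.length
  let num_dimensions := (state.headD []).length
  let num_row := ((state.headD []).headD []).length
  (List.range (num_hyper + 2)).map (fun h =>
    (List.range (num_dimensions + 2)).map (fun i =>
      (List.range (num_row + 2)).map (fun j =>
        (List.range (num_row + 2)).map (fun k =>
          if (1 ≤ h ∧ h ≤ num_hyper) ∧ (1 ≤ i ∧ i ≤ num_dimensions) ∧
             (1 ≤ j ∧ j ≤ num_row) ∧ (1 ≤ k ∧ k ≤ num_row) then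
            (((state.getD (h-1) []).getD (i-1) []).getD (j-1) []).getD (k-1) "."
          else "."))))

-- ===== PRECONDITION & SPEC =====
-- Pre_ excludes exactly the inputs on which Python A raises IndexError:
-- empty state / empty state[0], and (when R = len(state[0][0]) > 0, the only
-- case in which A subscripts state at all) inputs whose sublists are shorter
-- than the dimensions D = len(state[0]), R taken from the first slice.
def Pre_add_border (state : List (List (List (List String)))) : Prop :=
  state ≠ [] ∧ (state.headD []) ≠ [] ∧
  (((state.headD []).headD []).length = 0 ∨
  ∀ hy ∈ state,
    (state.headD []).length ≤ hy.length ∧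
    ∀ d ∈ hy.take (state.headD []).length,
      ((state.headD []).headD []).length ≤ d.length ∧
      ∀ r ∈ d.take ((state.headD []).headD []).length,
        ((state.headD []).headD []).length ≤ r.length)
instance (state : List (List (List (List String)))) : Decidable (Pre_add_border state) := by
  unfold Pre_add_border; infer_instance

def pvWitness_add_border : List (List (List (List String))) := [[[["#"]]]]

def Spec_add_border (state : List (List (List (List String)))) (out : List (List (List (List String)))) : Prop := out = add_border_alt state
instance (state : List (List (List (List String)))) (out : List (List (List (List String)))) : Decidable (Spec_add_border state out) := by unfold Spec_add_border; infer_instance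

-- ===== CLAIM (what is proved, stated in full; the proofs are below) =====
def Claim_equal_add_border : Prop := ∀ (state : List (List (List (List String)))), Dom_add_border state → Pre_add_border state → Spec_add_border state (add_border state)

-- ===== LEMMAS AND PROOFS =====

-- the append-loop is init ++ map
theorem foldl_append_map {α β : Type} (l : List α) (f : α → β) (init : List β) :
    l.foldl (fun acc x => acc ++ [f x]) init = init ++ l.map f := by
  induction l generalizing init with
  | nil => simp
  | cons a t ih => simp [List.foldl_cons, ih, List.append_assoc]

-- padded range map splits into border / shifted interior / border
theorem range_pad_split {α : Type} (n : Nat) (f : Nat → α) :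
    (List.range (n + 2)).map f
      = f 0 :: ((List.range n).map (fun x => f (x + 1)) ++ [f (n + 1)]) := by
  have h1 : n + 2 = (n + 1) + 1 := rfl
  rw [h1, List.range_succ, List.map_append, List.range_succ_eq_map]
  simp [List.map_map, Function.comp]

-- first-order componentwise congruence for the border shape
theorem cons_app_last {α : Type} {a a' c c' : α} {l l' : List α}
    (h1 : a = a') (h2 : l = l') (h3 : c = c') :
    a :: (l ++ [c]) = a' :: (l' ++ [c']) := by rw [h1, h2, h3]

-- ===== VERDICT (by name: the statement is the Claim_ definition above) =====
theorem add_border_spec : Claim_equal_add_border := by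
  intro state _ _
  unfold Spec_add_border add_border add_border_alt
  simp only [foldl_append_map, List.nil_append, List.map_const', List.length_range,
    List.cons_append]
  symm
  rw [range_pad_split]
  refine cons_app_last ?_ ?_ ?_
  · simp
  · refine List.map_congr_left (fun h hh => ?_)
    beta_reduce
    rw [range_pad_split]
    refine cons_app_last ?_ ?_ ?_
    · simp
    · refine List.map_congr_left (fun i hi => ?_)
      beta_reduce
      rw [range_pad_split]
      refine cons_app_last ?_ ?_ ?_
      · simp
      · refine List.map_congr_left (fun j hj => ?_)
        beta_reduce
        rw [range_pad_split]
        refine cons_app_last ?_ ?_ ?_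
        · simp
        · refine List.map_congr_left (fun k hk => ?_)
          beta_reduce
          rw [if_pos ⟨⟨Nat.le_add_left 1 h, List.mem_range.mp hh⟩,
            ⟨Nat.le_add_left 1 i, List.mem_range.mp hi⟩,
            ⟨Nat.le_add_left 1 j, List.mem_range.mp hj⟩,
            ⟨Nat.le_add_left 1 k, List.mem_range.mp hk⟩⟩]
          simp
        · simp
      · simp
    · simp
  · simp
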